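-- pv_equiv track=rewrite | github.com/LatifaAl-Aamri/ProblemOfTheDay | problemDay9.py | count_equal_case_substrings
-- ===== SOURCE A (Python) =====
-- def count_equal_case_substrings(s):
--     substrings = []
--     for i in range(len(s)):
--         for j in range(i+1, len(s)+1):
--             sub_str = s[i:j]
--             lower_count = sum(1 for char in sub_str if char.islower())
--             upper_count = sum(1 for char in sub_str if char.isupper())
--
--             if lower_count == upper_count:
--                 substrings.append(sub_str)
--
--     return substrings
-- ===== SOURCE B (Python) =====
-- def count_equal_case_substrings(s):
--     # Prefix balance sums: s[i:j] has equal lower/upper counts iff bal[i] == bal[j],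
--     # so the per-substring rescan disappears.
--     n = len(s)
--     bal = [0]
--     b = 0
--     for ch in s:
--         if ch.islower():
--             b += 1
--         elif ch.isupper():
--             b -= 1
--         bal.append(b)
--     result = []
--     for i in range(n):
--         for j in range(i + 1, n + 1):
--             if bal[i] == bal[j]:
--                 result.append(s[i:j])
--     return result
-- ===== Notes on version B (the rewrite author's own statement) =====
-- stated objective: faster
-- what changed: Replaces the per-substring rescan (counting lower/upper letters of every s[i:j] from scratch) by one prefix-balance array, making the equal-case test O(1) per (i,j) pair.
import Mathlib
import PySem

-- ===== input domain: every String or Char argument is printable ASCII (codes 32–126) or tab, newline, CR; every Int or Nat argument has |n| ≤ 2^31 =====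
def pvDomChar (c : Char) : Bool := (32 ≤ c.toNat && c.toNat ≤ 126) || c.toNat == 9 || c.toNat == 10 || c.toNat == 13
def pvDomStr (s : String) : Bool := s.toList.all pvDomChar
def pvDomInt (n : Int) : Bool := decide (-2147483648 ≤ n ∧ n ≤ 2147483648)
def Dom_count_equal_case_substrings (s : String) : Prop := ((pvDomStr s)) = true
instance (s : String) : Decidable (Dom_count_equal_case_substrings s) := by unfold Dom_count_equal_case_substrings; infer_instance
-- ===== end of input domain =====

-- B replaces A's per-substring letter recount by one prefix-balance array (O(1) test per pair); return values proved equal.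


-- ===== PORT A =====
def count_equal_case_substrings (s : String) : List String :=
  let cs := s.toList
  (PySem.List.pyRange 0 (cs.length : Int) 1).foldl (fun substrings i =>
    (PySem.List.pyRange (i + 1) ((cs.length : Int) + 1) 1).foldl (fun substrings j =>
      let sub_str := PySem.List.slice cs (some i) (some j)
      let lower_count := sub_str.foldl (fun a c => if PySem.Chars.islower c then a + 1 else a) (0 : Int)
      let upper_count := sub_str.foldl (fun a c => if PySem.Chars.isupper c then a + 1 else a) (0 : Int)
      if lower_count == upper_count then substrings ++ [String.ofList sub_str] else substrings)
      substrings)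
    []

-- ===== PORT B =====
def count_equal_case_substrings_alt (s : String) : List String :=
  let cs := s.toList
  let n : Int := (cs.length : Int)
  let st := cs.foldl (fun (st : Int × List Int) ch =>
    let b := if PySem.Chars.islower ch then st.1 + 1
             else if PySem.Chars.isupper ch then st.1 - 1 else st.1
    (b, st.2 ++ [b])) ((0 : Int), [(0 : Int)])
  let bal := st.2
  (PySem.List.pyRange 0 n 1).foldl (fun result i =>
    (PySem.List.pyRange (i + 1) (n + 1) 1).foldl (fun result j =>
      if PySem.List.pyGetD bal i 0 == PySem.List.pyGetD bal j 0
      then result ++ [String.ofList (PySem.List.slice cs (some i) (some j))] else result)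
      result)
    []

-- ===== PRECONDITION & SPEC =====
def Spec_count_equal_case_substrings (s : String) (out : List String) : Prop := out = count_equal_case_substrings_alt s
instance (s : String) (out : List String) : Decidable (Spec_count_equal_case_substrings s out) := by unfold Spec_count_equal_case_substrings; infer_instance

-- ===== CLAIM (what is proved, stated in full; the proofs are below) =====
def Claim_equal_count_equal_case_substrings : Prop := ∀ (s : String), Dom_count_equal_case_substrings s → Spec_count_equal_case_substrings s (count_equal_case_substrings s)

-- ===== LEMMAS AND PROOFS =====

-- weight of one character in the balance
def pvW (c : Char) : Int := if PySem.Chars.islower c then 1 else if PySem.Chars.isupper c then -1 else 0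

-- prefix balance of the first k characters
def pvBal (cs : List Char) (k : Nat) : Int := ((cs.take k).map pvW).sum

-- B's building fold produces exactly the list of prefix balances
theorem pvFold_char (l : List Char) (b : Int) (acc : List Int) :
    l.foldl (fun (st : Int × List Int) ch =>
      let b' := if PySem.Chars.islower ch then st.1 + 1
                else if PySem.Chars.isupper ch then st.1 - 1 else st.1
      (b', st.2 ++ [b'])) (b, acc)
    = (b + (l.map pvW).sum,
       acc ++ (List.range l.length).map (fun k => b + ((l.take (k+1)).map pvW).sum)) := by
  induction l generalizing b acc with
  | nil => simp
  | cons c t ih =>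
    simp only [List.foldl_cons, ih]
    have hw : (if PySem.Chars.islower c then b + 1
               else if PySem.Chars.isupper c then b - 1 else b) = b + pvW c := by
      unfold pvW; split_ifs <;> ring
    rw [hw]
    congr 1
    · simp [add_assoc]
    · rw [List.length_cons, List.range_succ_eq_map, List.map_cons, List.map_map]
      simp [List.take_succ_cons, Function.comp, add_assoc]

theorem pvBal_list (cs : List Char) :
    (cs.foldl (fun (st : Int × List Int) ch =>
      let b := if PySem.Chars.islower ch then st.1 + 1
               else if PySem.Chars.isupper ch then st.1 - 1 else st.1
      (b, st.2 ++ [b])) ((0 : Int), [(0 : Int)])).2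
    = (List.range (cs.length + 1)).map (fun k => pvBal cs k) := by
  rw [pvFold_char, List.range_succ_eq_map]
  simp [pvBal, List.map_map, Function.comp]

-- count fold = countP, as Int
theorem pvCount_fold (p : Char → Bool) (l : List Char) (a : Int) :
    l.foldl (fun a c => if p c then a + 1 else a) a = a + (l.countP p : Int) := by
  induction l generalizing a with
  | nil => simp
  | cons c t ih =>
    simp only [List.foldl_cons, ih, List.countP_cons]
    split_ifs <;> simp <;> ring

-- a character is never lower and upper at once
theorem pvLU_disjoint (c : Char) :
    ¬ (PySem.Chars.islower c = true ∧ PySem.Chars.isupper c = true) := by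
  unfold PySem.Chars.islower PySem.Chars.isupper
  intro ⟨h1, h2⟩
  simp at h1 h2
  exact absurd (le_trans h1.1 h2.2) (by decide)

-- the weighted sum is the lower-count minus the upper-count
theorem pvSumW (l : List Char) :
    (l.map pvW).sum = (l.countP PySem.Chars.islower : Int) - (l.countP PySem.Chars.isupper : Int) := by
  induction l with
  | nil => simp
  | cons c t ih =>
    simp only [List.map_cons, List.sum_cons, ih, List.countP_cons]
    unfold pvW
    rcases hl : PySem.Chars.islower c <;> rcases hu : PySem.Chars.isupper c <;>
      simp [hl, hu] <;> try ring
    exact absurd ⟨hl, hu⟩ (pvLU_disjoint c)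

-- the balance difference over [iN, jN) is the weighted sum of the slice
theorem pvBal_slice (cs : List Char) (iN jN : Nat) (hij : iN ≤ jN) :
    pvBal cs jN - pvBal cs iN = ((((cs.drop iN).take (jN - iN)).map pvW)).sum := by
  unfold pvBal
  rw [show jN = iN + (jN - iN) by omega, List.take_add]
  simp

theorem count_equal_case_substrings_spec' (s : String) :
    count_equal_case_substrings s = count_equal_case_substrings_alt s := by
  simp only [count_equal_case_substrings, count_equal_case_substrings_alt]
  rw [pvBal_list s.toList]
  apply PySem.List.foldl_congr_mem
  intro acc i hi
  rw [PySem.List.mem_pyRange_one] at hi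
  apply PySem.List.foldl_congr_mem
  intro acc2 j hj
  rw [PySem.List.mem_pyRange_one] at hj
  have hj0 : 0 ≤ j := by omega
  lift i to Nat using hi.1 with iN
  lift j to Nat using hj0 with jN
  have hij : iN ≤ jN := by exact_mod_cast le_of_lt (by exact_mod_cast lt_of_lt_of_le (by omega : (iN : Int) < iN + 1) hj.1)
  have hjn : jN < s.toList.length + 1 := by exact_mod_cast hj.2
  rw [PySem.List.slice_natCast, PySem.List.pyGetD_natCast, PySem.List.pyGetD_natCast,
      PySem.List.getD_map_range _ _ _ _ (by omega), PySem.List.getD_map_range _ _ _ _ (by omega),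
      pvCount_fold, pvCount_fold]
  have hcond : ((0 + (((List.take (jN - iN) (List.drop iN s.toList)).countP PySem.Chars.islower : Int)) ==
        0 + (((List.take (jN - iN) (List.drop iN s.toList)).countP PySem.Chars.isupper : Int)))
      = (pvBal s.toList iN == pvBal s.toList jN)) := by
    have hs := pvSumW (List.take (jN - iN) (List.drop iN s.toList))
    have hb := pvBal_slice s.toList iN jN hij
    rw [Bool.eq_iff_iff]
    simp only [beq_iff_eq]
    omega
  rw [hcond]

-- ===== VERDICT (by name: the statement is the Claim_ definition above) =====
theorem count_equal_case_substrings_spec : Claim_equal_count_equal_case_substrings := by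
  intro s _
  exact count_equal_case_substrings_spec' s
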